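-- pv_equiv track=rewrite | github.com/cdknorow/workflow_orchestration | src/coral/tools/session_manager.py | _rejoin_pulse_lines
-- ===== SOURCE A (Python) =====
-- def _rejoin_pulse_lines(lines: list[str]) -> list[str]:
--     """Rejoin lines where ``||PULSE:...||`` tags were split by terminal wrapping.
--
--     ``tmux pipe-pane`` captures output with hard wraps at the terminal width,
--     which can split a single PULSE tag across multiple log lines, e.g.::
--
--         ||PULSE:SUMMARY Moving Settings button to top gear icon and creating
--         persistent settings store in database||
--
--     This function detects an opening ``||PULSE:`` without a closing ``||`` on
--     the same line and merges subsequent lines until the closing ``||`` is found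
--     (up to *MAX_JOIN* continuation lines as a safety limit).
--     """
--     MAX_JOIN = 5
--     result: list[str] = []
--     pending: str | None = None
--     depth = 0
--
--     for line in lines:
--         if pending is not None:
--             # Accumulating continuation of a split PULSE tag
--             pending = pending + " " + line.strip()
--             depth += 1
--             if "||" in line or depth >= MAX_JOIN:
--                 result.append(pending)
--                 pending = None
--                 depth = 0
--         elif "||PULSE:" in line:
--             # Check whether the tag is complete on this line
--             idx = line.rfind("||PULSE:")
--             rest = line[idx + len("||PULSE:"):]
--             if "||" in rest:
--                 # Complete tag — emit as-is
--                 result.append(line)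
--             else:
--                 # Incomplete tag — start accumulating
--                 pending = line
--                 depth = 0
--         else:
--             result.append(line)
--
--     # Flush any incomplete tag at end of chunk
--     if pending is not None:
--         result.append(pending)
--
--     return result
-- ===== SOURCE B (Python) =====
-- def _rejoin_pulse_lines(lines: list[str]) -> list[str]:
--     """Index-driven rewrite: outer scan over positions plus an inner loop that
--     consumes the continuation lines of a split PULSE tag in one go."""
--     MAX_JOIN = 5
--     result: list[str] = []
--     i = 0
--     n = len(lines)
--     while i < n:
--         line = lines[i]
--         if "||PULSE:" not in line or "||" in line[line.rfind("||PULSE:") + 8:]: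
--             # Complete tag or ordinary line — emit as-is
--             result.append(line)
--             i += 1
--             continue
--         # Incomplete tag — join following lines until "||" or the safety limit
--         acc = line
--         j = 1
--         while i + j < n:
--             nxt = lines[i + j]
--             acc = acc + " " + nxt.strip()
--             if "||" in nxt or j >= MAX_JOIN:
--                 break
--             j += 1
--         result.append(acc)
--         i += j + 1
--     return result
-- ===== Notes on version B (the rewrite author's own statement) =====
-- stated objective: alternative
-- what changed: Replaces A's single-pass pending/depth state machine with an index-driven outer scan plus an inner loop that consumes all continuation lines of a split PULSE tag in one go.
import Mathlib
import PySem

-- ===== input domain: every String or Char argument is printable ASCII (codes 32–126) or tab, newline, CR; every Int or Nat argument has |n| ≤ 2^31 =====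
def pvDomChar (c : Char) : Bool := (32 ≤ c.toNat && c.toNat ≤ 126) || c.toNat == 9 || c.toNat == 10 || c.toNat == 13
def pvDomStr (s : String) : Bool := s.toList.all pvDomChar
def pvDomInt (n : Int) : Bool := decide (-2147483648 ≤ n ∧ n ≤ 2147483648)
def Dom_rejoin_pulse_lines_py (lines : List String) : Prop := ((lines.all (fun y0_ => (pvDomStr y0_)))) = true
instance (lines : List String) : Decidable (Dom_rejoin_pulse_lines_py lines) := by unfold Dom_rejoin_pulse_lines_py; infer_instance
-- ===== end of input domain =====

-- B replaces A's pending/depth state machine by an index-driven outer scan with an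
-- inner loop that consumes a split tag's continuation lines in one go (objective: alternative).


-- ===== PORT A =====
-- A's loop over `lines` with state (pending, depth); result accumulation becomes cons-recursion.
def pulseA_go : List String → Option String → Int → List String
  | [], pending, _ =>
    match pending with
    | some p => [p]          -- flush any incomplete tag at end
    | none => []
  | line :: rest, pending, depth =>
    match pending with
    | some p =>
      let p' := p ++ " " ++ PySem.Str.strip line
      let d' := depth + 1
      if PySem.Str.isIn "||" line || d' ≥ 5 then
        p' :: pulseA_go rest none 0
      else
        pulseA_go rest (some p') d'
    | none =>
      if PySem.Str.isIn "||PULSE:" line then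
        let idx := PySem.Str.rfind line "||PULSE:"
        let restS := PySem.Str.slice line (some (idx + 8)) none
        if PySem.Str.isIn "||" restS then
          line :: pulseA_go rest none 0
        else
          pulseA_go rest (some line) 0
      else
        line :: pulseA_go rest none 0

def rejoin_pulse_lines_py (lines : List String) : List String :=
  pulseA_go lines none 0

-- ===== PORT B =====
-- B's inner `while i + j < n` loop: consume continuation lines, return (acc, remaining lines).
def pulse_consume (acc : String) (j : Int) : List String → String × List String
  | [] => (acc, [])
  | nxt :: rest =>
    let acc' := acc ++ " " ++ PySem.Str.strip nxt
    if PySem.Str.isIn "||" nxt || j ≥ 5 then (acc', rest)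
    else pulse_consume acc' (j + 1) rest

-- needed by the port's termination proof
theorem pulse_consume_length_le (l : List String) :
    ∀ acc j, (pulse_consume acc j l).2.length ≤ l.length := by
  induction l with
  | nil => intro acc j; simp [pulse_consume]
  | cons nxt rest ih =>
    intro acc j
    simp only [pulse_consume]
    split
    · simp
    · exact le_trans (ih _ _) (by simp)

-- B's test "no ||PULSE:, or the part after the last ||PULSE: already has ||"
def pulse_complete (line : String) : Bool :=
  !PySem.Str.isIn "||PULSE:" line ||
    PySem.Str.isIn "||" (PySem.Str.slice line (some (PySem.Str.rfind line "||PULSE:" + 8)) none)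

def rejoin_pulse_lines_py_alt (lines : List String) : List String :=
  match lines with
  | [] => []
  | line :: rest =>
    if pulse_complete line then
      line :: rejoin_pulse_lines_py_alt rest
    else
      let r := pulse_consume line 1 rest
      r.1 :: rejoin_pulse_lines_py_alt r.2
termination_by lines.length
decreasing_by
  · simp
  · have := pulse_consume_length_le rest line 1
    simp; omega

-- ===== PRECONDITION & SPEC =====
def Spec_rejoin_pulse_lines_py (lines : List String) (out : List String) : Prop := out = rejoin_pulse_lines_py_alt lines
instance (lines : List String) (out : List String) : Decidable (Spec_rejoin_pulse_lines_py lines out) := by unfold Spec_rejoin_pulse_lines_py; infer_instance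

-- ===== CLAIM (what is proved, stated in full; the proofs are below) =====
def Claim_equal_rejoin_pulse_lines_py : Prop := ∀ (lines : List String), Dom_rejoin_pulse_lines_py lines → Spec_rejoin_pulse_lines_py lines (rejoin_pulse_lines_py lines)

-- ===== LEMMAS AND PROOFS =====

-- The invariant: A with no pending line agrees with B, and A accumulating pending `p` at
-- depth `d` agrees with B's inner loop started at counter `j = d + 1`, then B resumed.
theorem pulse_key (l : List String) :
    (pulseA_go l none 0 = rejoin_pulse_lines_py_alt l) ∧
    (∀ p d, pulseA_go l (some p) d =
      (pulse_consume p (d + 1) l).1 ::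
        rejoin_pulse_lines_py_alt (pulse_consume p (d + 1) l).2) := by
  induction l with
  | nil =>
    constructor
    · simp [pulseA_go, rejoin_pulse_lines_py_alt]
    · intro p d; simp [pulseA_go, pulse_consume, rejoin_pulse_lines_py_alt]
  | cons line rest ih =>
    constructor
    · rw [rejoin_pulse_lines_py_alt]
      simp only [pulseA_go, pulse_complete]
      by_cases h1 : PySem.Str.isIn "||PULSE:" line = true
      · by_cases h2 : PySem.Str.isIn "||"
            (PySem.Str.slice line (some (PySem.Str.rfind line "||PULSE:" + 8)) none) = true
        · simp at h1 h2
          simp [h1, h2, ih.1]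
        · simp at h1 h2
          simpa [h1, h2] using ih.2 line 0
      · simp at h1
        simp [h1, ih.1]
    · intro p d
      simp only [pulseA_go, pulse_consume]
      by_cases h : (PySem.Str.isIn "||" line || decide (d + 1 ≥ 5)) = true
      · simp at h
        simp [h, ih.1]
      · simp at h
        obtain ⟨hA, hB⟩ := h
        simpa [hA, show ¬((5:Int) ≤ d + 1) from by omega, add_assoc]
          using ih.2 (p ++ " " ++ PySem.Str.strip line) (d + 1)

-- ===== VERDICT (by name: the statement is the Claim_ definition above) =====
theorem rejoin_pulse_lines_py_spec : Claim_equal_rejoin_pulse_lines_py := by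
  intro lines _
  unfold Spec_rejoin_pulse_lines_py rejoin_pulse_lines_py
  exact (pulse_key lines).1
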